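-- pv_equiv track=rewrite | github.com/DamithDilhan/advent-of-code | 2021/day20/day20.py | square2bin
-- ===== SOURCE A (Python) =====
-- def square2bin(content: list):
--     l = len(content) - 1
--     value = 0
--     for pixel in content:
--         if pixel == ".":
--             l -= 1
--         else:
--             value += 2 ** l
--             l -= 1
--
--     return value
-- ===== SOURCE B (Python) =====
-- def square2bin(content: list):
--     value = 0
--     for pixel in content:
--         value = value * 2 + (0 if pixel == "." else 1)
--     return value
-- ===== Notes on version B (the rewrite author's own statement) =====
-- stated objective: simpler
-- what changed: Replaces the descending-index loop that adds 2**l per lit pixel with Horner's method: a single accumulator doubled each step plus the pixel bit, dropping the length computation and per-pixel exponentiation.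
import Mathlib
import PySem

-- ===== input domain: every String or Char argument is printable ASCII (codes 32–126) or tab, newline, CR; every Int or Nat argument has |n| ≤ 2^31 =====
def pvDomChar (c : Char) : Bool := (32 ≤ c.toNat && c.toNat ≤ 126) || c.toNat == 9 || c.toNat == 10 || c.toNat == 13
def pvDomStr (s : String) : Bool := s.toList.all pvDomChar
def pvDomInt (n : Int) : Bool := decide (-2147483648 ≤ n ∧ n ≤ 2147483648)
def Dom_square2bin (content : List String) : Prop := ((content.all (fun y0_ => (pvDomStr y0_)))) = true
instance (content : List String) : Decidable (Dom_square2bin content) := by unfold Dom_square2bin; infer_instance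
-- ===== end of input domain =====

-- ===== PORT A =====
-- A: descending index l starting at len-1; each non-"." pixel adds 2^l.
-- (l is only used as an exponent while l ≥ 0, so 2 ^ s.1.toNat is exact.)
def stepA (s : Int × Int) (pixel : String) : Int × Int :=
  if pixel == "." then (s.1 - 1, s.2)
  else (s.1 - 1, s.2 + 2 ^ s.1.toNat)

def square2bin (content : List String) : Int :=
  (content.foldl stepA ((content.length : Int) - 1, 0)).2

-- ===== PORT B =====
-- B (Horner): double the accumulator and add the pixel bit.
def stepB (v : Int) (pixel : String) : Int :=
  v * 2 + (if pixel == "." then 0 else 1)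

def square2bin_alt (content : List String) : Int :=
  content.foldl stepB 0

-- ===== PRECONDITION & SPEC =====
def Spec_square2bin (content : List String) (out : Int) : Prop := out = square2bin_alt content
instance (content : List String) (out : Int) : Decidable (Spec_square2bin content out) := by unfold Spec_square2bin; infer_instance

-- ===== CLAIM (what is proved, stated in full; the proofs are below) =====
def Claim_equal_square2bin : Prop := ∀ (content : List String), Dom_square2bin content → Spec_square2bin content (square2bin content)

-- ===== LEMMAS AND PROOFS =====

-- Horner's fold scales its seed by 2^length.
theorem foldB_scale (xs : List String) (v : Int) :
    xs.foldl stepB v = v * 2 ^ xs.length + xs.foldl stepB 0 := by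
  induction xs generalizing v with
  | nil => simp
  | cons x xs ih =>
    simp only [List.foldl_cons, List.length_cons]
    rw [ih (stepB v x), ih (stepB 0 x)]
    simp only [stepB]
    split_ifs <;> ring

-- A's loop started with index xs.length - 1 and seed v equals v + B's fold.
theorem foldA_eq (xs : List String) (v : Int) :
    (xs.foldl stepA ((xs.length : Int) - 1, v)).2 = v + xs.foldl stepB 0 := by
  induction xs generalizing v with
  | nil => simp
  | cons x xs ih =>
    simp only [List.foldl_cons, List.length_cons]
    have h1 : ((xs.length : Int) + 1 - 1) = (xs.length : Int) := by ring
    have h2 : ((xs.length : Int)).toNat = xs.length := Int.toNat_natCast xs.length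
    rw [foldB_scale xs (stepB 0 x)]
    by_cases hx : x = "."
    · simp only [stepA, stepB, hx, beq_self_eq_true, if_true]
      push_cast
      rw [show ((xs.length : Int) + 1 - 1 - 1) = (xs.length : Int) - 1 by ring, ih]
      simp
    · have hb : (x == ".") = false := by simp [hx]
      simp only [stepA, stepB, hb]
      push_cast
      rw [show ((xs.length : Int) + 1 - 1 - 1) = (xs.length : Int) - 1 by ring, ih]
      rw [show ((xs.length : Int) + 1 - 1) = (xs.length : Int) by ring, h2]
      ring

-- ===== VERDICT (by name: the statement is the Claim_ definition above) =====
theorem square2bin_spec : Claim_equal_square2bin := by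
  intro content _
  unfold Spec_square2bin square2bin square2bin_alt
  simpa using foldA_eq content 0
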